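-- pv_equiv track=rewrite | github.com/saiirajj7/DSA | Python/SquareEven.py | squareEven
-- ===== SOURCE A (Python) =====
-- def squareEven(a):
--     b = []
--     for i in range(len(a)):
--         if i % 2 == 0:
--             x = a[i] * a[i]
--             b.extend([x])
--         else:
--             b.append(a[i])
--     return b
-- ===== SOURCE B (Python) =====
-- def squareEven(a):
--     b = list(a)
--     b[::2] = [v * v for v in b[::2]]
--     return b
-- ===== Notes on version B (the rewrite author's own statement) =====
-- stated objective: idiomatic
-- what changed: Replaces the index loop with its per-index parity branch by copying the list and reassigning the even-index extended slice b[::2] with its squares in one slice operation.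
import Mathlib
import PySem

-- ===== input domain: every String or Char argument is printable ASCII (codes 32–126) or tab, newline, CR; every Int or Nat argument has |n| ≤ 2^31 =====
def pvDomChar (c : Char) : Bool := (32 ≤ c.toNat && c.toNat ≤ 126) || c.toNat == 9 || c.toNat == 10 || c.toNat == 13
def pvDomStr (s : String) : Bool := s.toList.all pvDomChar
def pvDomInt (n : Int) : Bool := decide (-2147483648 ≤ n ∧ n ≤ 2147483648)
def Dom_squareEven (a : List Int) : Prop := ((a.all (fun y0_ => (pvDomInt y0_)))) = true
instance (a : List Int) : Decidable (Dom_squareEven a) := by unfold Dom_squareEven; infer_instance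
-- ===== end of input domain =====

-- B copies the list and reassigns the even-index slice b[::2] with its squares, instead of A's
-- index loop with a per-index parity branch; same O(n) cost, return value proved equal on all inputs.

-- ===== PORT A =====
def squareEven (a : List Int) : List Int :=
  (PySem.List.pyRange 0 (a.length : Int) 1).foldl
    (fun b i =>
      if PySem.Int.mod i 2 = 0 then
        let x := PySem.List.pyGetD a i 0 * PySem.List.pyGetD a i 0
        b ++ [x]
      else
        b ++ [PySem.List.pyGetD a i 0]) []

-- ===== PORT B =====
-- b[::2] = vals  (extended-slice assignment with step 2; lengths always match here)
def pySetStep2 : List Int → List Int → List Int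
  | [], xs => xs
  | _ :: _, [] => []
  | v :: vs, _ :: xs =>
    v :: (match xs with
          | [] => []
          | y :: ys => y :: pySetStep2 vs ys)

def squareEven_alt (a : List Int) : List Int :=
  let b := a   -- list(a): a fresh copy in Python; values identical
  let evens := ((PySem.List.slice? b none none 2).getD []).map (fun v => v * v)
  pySetStep2 evens b

-- ===== PRECONDITION & SPEC =====
def Spec_squareEven (a : List Int) (out : List Int) : Prop := out = squareEven_alt a
instance (a : List Int) (out : List Int) : Decidable (Spec_squareEven a out) := by unfold Spec_squareEven; infer_instance

-- ===== CLAIM (what is proved, stated in full; the proofs are below) =====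
def Claim_equal_squareEven : Prop := ∀ (a : List Int), Dom_squareEven a → Spec_squareEven a (squareEven a)

-- ===== LEMMAS AND PROOFS =====

-- slice? [::2] structural facts
theorem slice2_one (x : Int) : PySem.List.slice? [x] none none 2 = some [x] := by
  simp [PySem.List.slice?, PySem.List.sliceIndices]

theorem slice2_cons2 (x y : Int) (xs : List Int) :
    PySem.List.slice? (x :: y :: xs) none none 2
      = some (x :: (PySem.List.slice? xs none none 2).getD []) := by
  simp only [PySem.List.slice?, PySem.List.sliceIndices]
  norm_num
  have hc1 : (((xs.length : Int) + 1 + 1 + 2 - 1) / 2).toNat = (xs.length + 1) / 2 + 1 := by omega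
  have hc2 : (if 0 < xs.length then (((xs.length : Int) + 2 - 1) / 2).toNat else 0)
      = (xs.length + 1) / 2 := by split <;> omega
  rw [hc1, hc2]
  rw [if_pos (by positivity), List.range_succ_eq_map, List.filterMap_cons, List.filterMap_map]
  norm_num
  apply List.filterMap_congr
  intro k _
  have h1 : (2 * ((k : Int) + 1)).toNat = 2 * k + 2 := by omega
  have h2 : (2 * (k : Int)).toNat = 2 * k := by omega
  simp only [h2]
  rw [h1]
  simp

-- structural equations for B's port
theorem alt_nil : squareEven_alt [] = [] := by decide

theorem alt_one (x : Int) : squareEven_alt [x] = [x * x] := by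
  simp [squareEven_alt, slice2_one, pySetStep2]

theorem alt_cons2 (x y : Int) (xs : List Int) :
    squareEven_alt (x :: y :: xs) = x * x :: y :: squareEven_alt xs := by
  simp [squareEven_alt, slice2_cons2, pySetStep2]

theorem len_alt : ∀ a : List Int, (squareEven_alt a).length = a.length
  | [] => by rw [alt_nil]
  | [x] => by rw [alt_one]; rfl
  | x :: y :: xs => by rw [alt_cons2]; simp [len_alt xs]

theorem get_alt : ∀ (a : List Int) (k : Nat) (h : k < a.length),
    (squareEven_alt a)[k]'(by rw [len_alt]; exact h)
      = if k % 2 = 0 then a[k] * a[k] else a[k]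
  | [x], 0, _ => by simp [alt_one]
  | x :: y :: xs, 0, _ => by simp [alt_cons2]
  | x :: y :: xs, 1, _ => by simp [alt_cons2]
  | x :: y :: xs, (k+2), h => by
      have hk : k < xs.length := by simpa using Nat.lt_of_add_lt_add_right h
      have := get_alt xs k hk
      simp only [alt_cons2, List.getElem_cons_succ]
      rw [this]
      have : (k + 2) % 2 = k % 2 := by omega
      simp [this]

theorem squareEven_eq_map (a : List Int) :
    squareEven a = (PySem.List.pyRange 0 (a.length : Int) 1).map
      (fun i => if PySem.Int.mod i 2 = 0
                then PySem.List.pyGetD a i 0 * PySem.List.pyGetD a i 0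
                else PySem.List.pyGetD a i 0) := by
  unfold squareEven
  have hf : (fun (b : List Int) (i : Int) =>
      if PySem.Int.mod i 2 = 0 then
        let x := PySem.List.pyGetD a i 0 * PySem.List.pyGetD a i 0
        b ++ [x]
      else b ++ [PySem.List.pyGetD a i 0])
    = fun (b : List Int) (i : Int) => b ++ [if PySem.Int.mod i 2 = 0
        then PySem.List.pyGetD a i 0 * PySem.List.pyGetD a i 0
        else PySem.List.pyGetD a i 0] := by
    funext b i; split <;> rfl
  rw [hf, PySem.List.foldl_append_singleton_eq_map]
  simp

-- ===== VERDICT (by name: the statement is the Claim_ definition above) =====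
theorem squareEven_spec : Claim_equal_squareEven := by
  intro a _
  unfold Spec_squareEven
  rw [squareEven_eq_map]
  apply List.ext_getElem
  · simp [PySem.List.length_pyRange_one, len_alt]
  · intro k h1 h2
    have hk : k < a.length := by
      simpa [PySem.List.length_pyRange_one] using h1
    rw [List.getElem_map]
    rw [PySem.List.getElem_pyRange_one]
    have hget : PySem.List.pyGetD a ((0:Int) + (k:Int)) 0 = a[k] := by
      simp [PySem.List.pyGetD_natCast, hk]
    have hmod : (PySem.Int.mod ((0:Int) + (k:Int)) 2 = 0) ↔ (k % 2 = 0) := by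
      simp
      omega
    rw [get_alt a k hk]
    by_cases hp : k % 2 = 0
    · rw [if_pos hp, if_pos (hmod.mpr hp), hget]
    · rw [if_neg hp, if_neg (fun hh => hp (hmod.mp hh)), hget]
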